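-- pv_equiv track=rewrite | github.com/sleeping-in-bed/psplpy | psplpy/data_process.py | find_list_duplicates
-- ===== SOURCE A (Python) =====
-- def find_list_duplicates(lst: list) -> dict:
--     '''
--     find out all duplicate items in list, return the item: [offset] dict
--     :return: {item1: [offset1, offset2, ...], item2: ..., ...}
--     '''
--     duplicates = {}
--     for i, item in enumerate(lst):
--         if item in duplicates:
--             duplicates[item].append(i)
--         else:
--             duplicates[item] = [i]
--
--     result = {}
--     for item, indices in duplicates.items():
--         if len(indices) > 1:
--             result[item] = indices
--
--     return result
-- ===== SOURCE B (Python) =====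
-- def find_list_duplicates(lst: list) -> dict:
--     '''
--     find out all duplicate items in list, return the item: [offset] dict
--     :return: {item1: [offset1, offset2, ...], item2: ..., ...}
--     '''
--     counts = {}
--     for item in lst:
--         counts[item] = counts.get(item, 0) + 1
--     result = {}
--     for i, item in enumerate(lst):
--         if counts[item] > 1:
--             result.setdefault(item, []).append(i)
--     return result
-- ===== Notes on version B (the rewrite author's own statement) =====
-- stated objective: idiomatic
-- what changed: A groups every offset into a dict and then filters out the singleton groups in a second dict-rebuilding pass; B first builds a plain occurrence counter and then collects offsets in one enumerate pass guarded by counts[item] > 1, so no group is ever built for unique items and no filtering pass exists.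
import Mathlib
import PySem

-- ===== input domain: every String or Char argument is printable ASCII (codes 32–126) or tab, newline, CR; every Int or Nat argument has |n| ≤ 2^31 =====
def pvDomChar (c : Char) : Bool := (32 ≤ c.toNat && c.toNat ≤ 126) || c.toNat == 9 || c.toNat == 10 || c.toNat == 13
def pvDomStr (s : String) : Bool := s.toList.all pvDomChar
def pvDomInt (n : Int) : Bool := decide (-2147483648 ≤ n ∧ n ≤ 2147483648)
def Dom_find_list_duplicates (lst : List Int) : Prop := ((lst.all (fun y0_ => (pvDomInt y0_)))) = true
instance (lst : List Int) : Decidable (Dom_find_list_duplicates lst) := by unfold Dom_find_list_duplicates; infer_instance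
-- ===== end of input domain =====

-- B replaces A's group-everything-then-filter two-dict pipeline by a counting pass plus one
-- count-guarded collection pass (idiomatic; same O(n) cost).

-- ===== PORT A =====
-- literal port of A: first loop groups every offset by item, second loop keeps groups of length > 1
def find_list_duplicates (lst : List Int) : List (Int × List Int) :=
  let duplicates := (PySem.List.enumerate lst).foldl
    (fun d p => if d.contains p.2 then d.modify p.2 [] (fun v => v ++ [p.1])
                else d.insert p.2 [p.1])
    PySem.Dict.empty
  let result := duplicates.items.foldl
    (fun r q => if 1 < q.2.length then r.insert q.1 q.2 else r)
    PySem.Dict.empty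
  result.items

-- ===== PORT B =====
-- literal port of B: counting loop, then one enumerate pass guarded by counts[item] > 1
def find_list_duplicates_alt (lst : List Int) : List (Int × List Int) :=
  let counts := lst.foldl (fun d x => d.insert x (d.getD x 0 + 1)) (PySem.Dict.empty : PySem.Dict Int Int)
  let result := (PySem.List.enumerate lst).foldl
    (fun r p => if 1 < counts.getD p.2 0 then
                  (r.setdefault p.2 []).modify p.2 [] (fun v => v ++ [p.1])
                else r)
    PySem.Dict.empty
  result.items

-- ===== PRECONDITION & SPEC =====
def Spec_find_list_duplicates (lst : List Int) (out : List (Int × List Int)) : Prop := out = find_list_duplicates_alt lst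
instance (lst : List Int) (out : List (Int × List Int)) : Decidable (Spec_find_list_duplicates lst out) := by unfold Spec_find_list_duplicates; infer_instance

-- ===== CLAIM (what is proved, stated in full; the proofs are below) =====
def Claim_equal_find_list_duplicates : Prop := ∀ (lst : List Int), Dom_find_list_duplicates lst → Spec_find_list_duplicates lst (find_list_duplicates lst)

-- ===== LEMMAS AND PROOFS =====

-- indices at which k occurs in lst (the offset list both programs attach to k)
def pvOcc (lst : List Int) (k : Int) : List Int :=
  ((PySem.List.enumerate lst).filter (fun p => p.2 == k)).map (fun p => p.1)

-- A's grouping step is one unconditional `modify`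
lemma stepA_eq (d : PySem.Dict Int (List Int)) (p : Int × Int) :
    (if d.contains p.2 then d.modify p.2 [] (fun v => v ++ [p.1]) else d.insert p.2 [p.1])
      = d.modify p.2 [] (fun v => v ++ [p.1]) := by
  by_cases h : d.contains p.2
  · simp [h]
  · simp only [Bool.not_eq_true] at h
    simp [h, PySem.Dict.modify, PySem.Dict.getD_of_not_contains _ _ h]

-- B's setdefault-then-append step is the same unconditional `modify`
lemma stepB_eq (r : PySem.Dict Int (List Int)) (k x : Int) :
    (r.setdefault k []).modify k [] (fun v => v ++ [x]) = r.modify k [] (fun v => v ++ [x]) := by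
  by_cases h : r.contains k
  · rw [PySem.Dict.setdefault_of_contains _ _ h]
  · simp only [Bool.not_eq_true] at h
    rw [PySem.Dict.setdefault_of_not_contains _ _ h]
    simp [PySem.Dict.modify, PySem.Dict.getD_of_not_contains _ _ h,
      PySem.Dict.getD_insert_self, PySem.Dict.insert_insert_self]

-- the grouping fold over any list of (index, item) pairs, characterised
lemma group_keys (l : List (Int × Int)) :
    ((l.foldl (fun d p => d.modify p.2 [] (fun v => v ++ [p.1])) PySem.Dict.empty).keys)
      = PySem.Set.ofList (l.map (fun p => p.2)) := by
  have h := PySem.Dict.keys_foldl_modify_key l (fun p => p.2) [] (fun _ p v => v ++ [p.1]) PySem.Dict.empty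
  simpa [PySem.Set.ofList, PySem.Set.update] using h

lemma group_nodup (l : List (Int × Int)) :
    ((l.foldl (fun d p => d.modify p.2 [] (fun v => v ++ [p.1])) PySem.Dict.empty).keys).Nodup := by
  exact PySem.Dict.nodup_keys_foldl_modify_key l (fun p => p.2) [] (fun _ p v => v ++ [p.1])
    PySem.Dict.empty (by simp)

lemma group_getD (l : List (Int × Int)) (k : Int) :
    (l.foldl (fun d p => d.modify p.2 [] (fun v => v ++ [p.1])) PySem.Dict.empty).getD k []
      = (l.filter (fun p => p.2 == k)).map (fun p => p.1) := by
  have h := PySem.Dict.getD_foldl_modify_append (l.map Prod.swap) PySem.Dict.empty k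
  rw [List.foldl_map] at h
  simp only [Prod.swap] at h
  rw [List.filter_map] at h
  simpa [Function.comp] using h

-- a guarded insert loop over pairs with distinct fresh keys just filters the pair list
lemma filter_insert_items (ps : List (Int × List Int)) (h : (ps.map (fun q => q.1)).Nodup) :
    (ps.foldl (fun r q => if 1 < q.2.length then r.insert q.1 q.2 else r) PySem.Dict.empty).items
      = ps.filter (fun q => 1 < q.2.length) := by
  have h1 : (ps.foldl (fun r q => if 1 < q.2.length then r.insert q.1 q.2 else r) PySem.Dict.empty)
      = (ps.filter (fun q => decide (1 < q.2.length))).foldl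
          (fun r q => r.insert q.1 q.2) PySem.Dict.empty := by
    rw [List.foldl_filter]
    simp
  have hnd : ((ps.filter (fun q => decide (1 < q.2.length))).map (fun q => q.1)).Nodup :=
    h.sublist (List.filter_sublist.map _)
  rw [h1, PySem.Dict.items_foldl_insert_fresh _ _ _ _ (by simp) hnd]
  simp [PySem.Dict.empty]

lemma ofList_filter (q : Int → Bool) (xs : List Int) :
    PySem.Set.ofList (xs.filter q) = (PySem.Set.ofList xs).filter q := by
  induction xs using List.reverseRecOn with
  | nil => rfl
  | append_singleton xs x ih =>
    have hadd : ∀ (s : PySem.Set Int) (y : Int),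
        PySem.Set.add s y = if y ∈ s then s else s ++ [y] := by
      intro s y
      by_cases hm : y ∈ s
      · simp [PySem.Set.add, PySem.Set.contains, hm]
      · simp [PySem.Set.add, PySem.Set.contains, hm]
    simp only [List.filter_append, List.filter_cons, List.filter_nil,
      PySem.Set.ofList, List.foldl_append, List.foldl_cons, List.foldl_nil] at *
    by_cases hq : q x
    · simp only [hq, if_pos, List.foldl_cons, List.foldl_nil, ih, hadd]
      by_cases hm : x ∈ List.foldl PySem.Set.add PySem.Set.empty xs
      · rw [if_pos (List.mem_filter.2 ⟨hm, hq⟩), if_pos hm]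
      · rw [if_neg (fun h => hm (List.mem_filter.1 h).1), if_neg hm, List.filter_append]
        simp [hq]
    · simp only [Bool.not_eq_true] at hq
      simp only [hq, Bool.false_eq_true, if_false, List.foldl_nil, ih, hadd]
      by_cases hm : x ∈ List.foldl PySem.Set.add PySem.Set.empty xs
      · rw [if_pos hm]
      · rw [if_neg hm, List.filter_append]
        simp [hq]

lemma occ_length (lst : List Int) (k : Int) : (pvOcc lst k).length = lst.count k := by
  unfold pvOcc
  rw [List.length_map, ← List.countP_eq_length_filter]
  conv_rhs => rw [← PySem.List.map_snd_enumerate lst 0, List.count_eq_countP, List.countP_map]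
  rfl

-- A's value, in closed form
lemma A_closed (lst : List Int) :
    find_list_duplicates lst
      = ((PySem.Set.ofList lst).filter (fun k => 1 < lst.count k)).map
          (fun k => (k, pvOcc lst k)) := by
  unfold find_list_duplicates
  have hstep : (PySem.List.enumerate lst).foldl
      (fun d p => if d.contains p.2 then d.modify p.2 [] (fun v => v ++ [p.1])
                  else d.insert p.2 [p.1]) PySem.Dict.empty
      = (PySem.List.enumerate lst).foldl
          (fun d p => d.modify p.2 [] (fun v => v ++ [p.1])) PySem.Dict.empty := by
    exact PySem.List.foldl_congr_mem _ _ _ _ (fun d p _ => stepA_eq d p)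
  simp only [hstep]
  have hnd : ((((PySem.List.enumerate lst).foldl
      (fun d p => d.modify p.2 [] (fun v => v ++ [p.1])) PySem.Dict.empty).items).map
        (fun q => q.1)).Nodup := group_nodup (PySem.List.enumerate lst)
  rw [filter_insert_items _ hnd]
  rw [PySem.Dict.items_eq_map_keys _ (group_nodup _) []]
  rw [group_keys, PySem.List.map_snd_enumerate]
  have hocc : ∀ k, ((PySem.List.enumerate lst).foldl
      (fun d p => d.modify p.2 [] (fun v => v ++ [p.1])) PySem.Dict.empty).getD k []
      = pvOcc lst k := fun k => group_getD (PySem.List.enumerate lst) k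
  simp only [hocc]
  rw [List.filter_map]
  apply congrArg
  apply List.filter_congr
  intro k _
  simp [Function.comp, occ_length]

-- B's value, in the same closed form
lemma B_closed (lst : List Int) :
    find_list_duplicates_alt lst
      = ((PySem.Set.ofList lst).filter (fun k => 1 < lst.count k)).map
          (fun k => (k, pvOcc lst k)) := by
  simp only [find_list_duplicates_alt]
  -- replace the loop body: setdefault+modify → modify, counter lookup → count
  have hstep : (PySem.List.enumerate lst).foldl
      (fun r p => if 1 < (lst.foldl (fun d x => d.insert x (d.getD x 0 + 1)) (PySem.Dict.empty : PySem.Dict Int Int)).getD p.2 0 then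
                    (r.setdefault p.2 []).modify p.2 [] (fun v => v ++ [p.1])
                  else r) PySem.Dict.empty
      = (PySem.List.enumerate lst).foldl
          (fun r p => if decide (1 < lst.count p.2) = true then
                        r.modify p.2 [] (fun v => v ++ [p.1])
                      else r) PySem.Dict.empty := by
    apply PySem.List.foldl_congr_mem
    intro r p _
    rw [stepB_eq]
    simp only [PySem.Dict.getD_foldl_insert_add_one, PySem.Dict.getD_empty]
    congr 1
    simp
  rw [hstep, ← List.foldl_filter]
  rw [PySem.Dict.items_eq_map_keys _ (group_nodup _) []]
  rw [group_keys]
  have hmap : ((PySem.List.enumerate lst).filter (fun p => decide (1 < lst.count p.2))).map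
      (fun p => p.2) = lst.filter (fun x => decide (1 < lst.count x)) := by
    have h := List.filter_map (f := fun p : Int × Int => p.2)
      (p := fun x => decide (1 < lst.count x)) (l := PySem.List.enumerate lst)
    rw [PySem.List.map_snd_enumerate] at h
    simpa [Function.comp] using h.symm
  rw [hmap, ofList_filter]
  apply List.map_congr_left
  intro k hk
  have hcount : 1 < lst.count k := by
    rw [List.mem_filter] at hk
    simpa using hk.2
  rw [group_getD]
  apply congrArg (Prod.mk k)
  unfold pvOcc
  apply congrArg
  rw [List.filter_filter]
  apply List.filter_congr
  intro p _
  by_cases hpk : p.2 = k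
  · simp [hpk, hcount]
  · simp [hpk]

-- ===== VERDICT (by name: the statement is the Claim_ definition above) =====
theorem find_list_duplicates_spec : Claim_equal_find_list_duplicates := by
  intro lst _
  unfold Spec_find_list_duplicates
  rw [A_closed, B_closed]
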